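-- pv_equiv track=rewrite | github.com/ayush-garg341/python | data_structures/daily_challenges/subarray_sort.py | subarray_sort
-- ===== SOURCE A (Python) =====
-- def subarray_sort(array):
--     """
--     Time complexity -> O(N logN)
--     space complexity -> O(N)
--     """
--     sorted_arr = sorted(array)
--     result = [-1, -1]
--     for i in range(len(array)):
--         if array[i] != sorted_arr[i]:
--             if result[0] == -1:
--                 result[0] = i
--             else:
--                 result[1] = i
--
--     return result
-- ===== SOURCE B (Python) =====
-- def subarray_sort(array):
--     # One O(N) pass each way: running max fixes the right boundary, running min the left.
--     left = -1
--     right = -1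
--     n = len(array)
--     if n:
--         mx = array[0]
--         for i in range(1, n):
--             x = array[i]
--             if x < mx:
--                 right = i
--             else:
--                 mx = x
--         mn = array[n - 1]
--         for i in range(n - 2, -1, -1):
--             x = array[i]
--             if x > mn:
--                 left = i
--             else:
--                 mn = x
--     return [left, right]
-- ===== Notes on version B (the rewrite author's own statement) =====
-- stated objective: faster
-- what changed: A sorts a copy and scans for mismatching positions; B never sorts: one forward pass with a running maximum finds the right boundary and one backward pass with a running minimum finds the left boundary.
import Mathlib
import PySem

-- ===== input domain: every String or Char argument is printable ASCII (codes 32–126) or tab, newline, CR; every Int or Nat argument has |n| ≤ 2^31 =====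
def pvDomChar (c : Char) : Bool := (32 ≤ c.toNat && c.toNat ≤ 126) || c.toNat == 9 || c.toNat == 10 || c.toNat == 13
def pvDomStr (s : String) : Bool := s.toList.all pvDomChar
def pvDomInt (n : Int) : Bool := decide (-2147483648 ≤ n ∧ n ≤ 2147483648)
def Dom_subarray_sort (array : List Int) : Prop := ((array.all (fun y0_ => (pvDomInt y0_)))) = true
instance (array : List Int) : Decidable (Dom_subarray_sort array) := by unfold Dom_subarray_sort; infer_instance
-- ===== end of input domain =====

-- B replaces A's sort-and-compare by the classic two linear passes (a running max locates
-- the right boundary, a running min the left); same return value, no sort needed.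

-- ===== PORT A =====
def subarray_sort (array : List Int) : List Int :=
  let sorted_arr := PySem.List.sorted array (fun x => x) false
  let result :=
    (PySem.List.pyRange 0 (PySem.List.len array) 1).foldl
      (fun (result : Int × Int) i =>
        if PySem.List.pyGetD array i 0 ≠ PySem.List.pyGetD sorted_arr i 0 then
          if result.1 = -1 then (i, result.2) else (result.1, i)
        else result)
      (-1, -1)
  [result.1, result.2]

-- ===== PORT B =====
def subarray_sort_alt (array : List Int) : List Int :=
  let n : Int := PySem.List.len array
  if n ≠ 0 then
    let st1 :=
      (PySem.List.pyRange 1 n 1).foldl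
        (fun (s : Int × Int) i =>
          let x := PySem.List.pyGetD array i 0
          if x < s.2 then (i, s.2) else (s.1, x))
        (-1, PySem.List.pyGetD array 0 0)
    let st2 :=
      (PySem.List.pyRange (n - 2) (-1) (-1)).foldl
        (fun (s : Int × Int) i =>
          let x := PySem.List.pyGetD array i 0
          if s.2 < x then (i, s.2) else (s.1, x))
        (-1, PySem.List.pyGetD array (n - 1) 0)
    [st2.1, st1.1]
  else [-1, -1]

-- ===== PRECONDITION & SPEC =====
def Spec_subarray_sort (array : List Int) (out : List Int) : Prop := out = subarray_sort_alt array
instance (array : List Int) (out : List Int) : Decidable (Spec_subarray_sort array out) := by unfold Spec_subarray_sort; infer_instance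

-- ===== CLAIM (what is proved, stated in full; the proofs are below) =====
def Claim_equal_subarray_sort : Prop := ∀ (array : List Int), Dom_subarray_sort array → Spec_subarray_sort array (subarray_sort array)

-- ===== LEMMAS AND PROOFS =====

def elt (a : List Int) (i : Nat) : Int := a.getD i 0
def ssort (a : List Int) : List Int := PySem.List.sorted a (fun x => x) false
def badL (a : List Int) (i : Nat) : Prop := ∃ j, j < a.length ∧ i < j ∧ elt a j < elt a i
def badR (a : List Int) (i : Nat) : Prop := ∃ j, j < i ∧ elt a i < elt a j
def mis (a : List Int) : List Nat :=
  (List.range a.length).filter (fun k => decide (elt a k ≠ elt (ssort a) k))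

theorem mem_mis {a : List Int} {i : Nat} :
    i ∈ mis a ↔ i < a.length ∧ elt a i ≠ elt (ssort a) i := by
  simp [mis, List.mem_filter]

theorem mis_pairwise (a : List Int) : (mis a).Pairwise (· < ·) := by
  exact (List.pairwise_lt_range).filter _

theorem pairwise_lt_le_getLast {l : List Nat} (h : l.Pairwise (· < ·)) (hne : l ≠ [])
    {x : Nat} (hx : x ∈ l) : x ≤ l.getLast hne := by
  have hdec : l.dropLast ++ [l.getLast hne] = l := List.dropLast_append_getLast hne
  rw [← hdec] at h hx
  rw [List.pairwise_append] at h
  rcases List.mem_append.mp hx with h1 | h2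
  · exact le_of_lt (h.2.2 x h1 _ (by simp))
  · simp at h2; omega

theorem ssort_perm (a : List Int) : (ssort a).Perm a := PySem.List.sorted_perm a _ _

theorem ssort_length (a : List Int) : (ssort a).length = a.length := PySem.List.length_sorted a _ _

theorem mis_eq_nil_iff {a : List Int} : mis a = [] ↔ a = ssort a := by
  rw [mis, List.filter_eq_nil_iff]
  constructor
  · intro h
    apply List.ext_getElem (by rw [ssort_length])
    intro i h1 h2
    have := h i (List.mem_range.mpr h1)
    simp only [decide_not, Bool.not_eq_true', decide_eq_false_iff_not, not_not] at this
    simpa [elt, List.getD_eq_getElem?_getD, List.getElem?_eq_getElem h1, List.getElem?_eq_getElem h2] using this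
  · intro h i hi
    simp [← h]

theorem ssort_split {p q : List Int} (hp : p.Pairwise (· ≤ ·))
    (hcross : ∀ x ∈ p, ∀ y ∈ q, x ≤ y) :
    ssort (p ++ q) = p ++ ssort q := by
  apply PySem.List.sorted_id_eq_of_perm_of_pairwise
  · exact List.Perm.append_left p (ssort_perm q)
  · refine List.pairwise_append.mpr ⟨hp, ?_, ?_⟩
    · exact PySem.List.sorted_pairwise q (fun x => x) 
    · intro x hx y hy
      exact hcross x hx y ((PySem.List.mem_sorted _ _ _ _).mp hy)

theorem ssort_split' {p q : List Int} (hq : q.Pairwise (· ≤ ·))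
    (hcross : ∀ x ∈ p, ∀ y ∈ q, x ≤ y) :
    ssort (p ++ q) = ssort p ++ q := by
  apply PySem.List.sorted_id_eq_of_perm_of_pairwise
  · exact List.Perm.append_right q (ssort_perm p)
  · refine List.pairwise_append.mpr ⟨PySem.List.sorted_pairwise p (fun x => x), hq, ?_⟩
    intro x hx y hy
    exact hcross x ((PySem.List.mem_sorted _ _ _ _).mp hx) y hy

theorem elt_eq {a : List Int} {i : Nat} (h : i < a.length) : elt a i = a[i] := by
  simp [elt, List.getD_eq_getElem?_getD, List.getElem?_eq_getElem h]

theorem not_badL_le {a : List Int} {i j : Nat} (h : ¬ badL a i) (hij : i < j)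
    (hj : j < a.length) : elt a i ≤ elt a j := by
  by_contra hc
  exact h ⟨j, hj, hij, by omega⟩

theorem not_badR_ge {a : List Int} {i j : Nat} (h : ¬ badR a j) (hij : i < j) :
    elt a i ≤ elt a j := by
  by_contra hc
  exact h ⟨i, hij, by omega⟩

theorem agree_prefix {a : List Int} {m : Nat} (hm : m ≤ a.length)
    (hL : ∀ i, i < m → ¬ badL a i) : (ssort a).take m = a.take m := by
  have hlen : (a.take m).length = m := by simp [hm]
  have hsplit : ssort a = a.take m ++ ssort (a.drop m) := by
    conv_lhs => rw [← List.take_append_drop m a]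
    apply ssort_split
    · rw [List.pairwise_iff_getElem]
      intro i j hi hj hij
      rw [hlen] at hi hj
      have h1 : i < a.length := by omega
      have h2 : j < a.length := by omega
      simp only [List.getElem_take]
      rw [← elt_eq h1, ← elt_eq h2]
      exact not_badL_le (hL i (by omega)) hij h2
    · intro x hx y hy
      rcases List.mem_iff_getElem.mp hx with ⟨i, hi, rfl⟩
      rcases List.mem_iff_getElem.mp hy with ⟨j, hj, rfl⟩
      rw [hlen] at hi
      have h1 : i < a.length := by omega
      have h2 : m + j < a.length := by simp only [List.length_drop] at hj; omega
      simp only [List.getElem_take, List.getElem_drop]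
      rw [← elt_eq h1, ← elt_eq h2]
      exact not_badL_le (hL i hi) (by omega) h2
  rw [hsplit, List.take_left' hlen]

theorem mism_at_left {a : List Int} {k : Nat} (hk : k < a.length)
    (hL : ∀ i, i < k → ¬ badL a i) (hb : badL a k) :
    elt (ssort a) k < elt a k := by
  have hlen : (a.take k).length = k := by simp [Nat.le_of_lt hk]
  have hsplit : ssort a = a.take k ++ ssort (a.drop k) := by
    conv_lhs => rw [← List.take_append_drop k a]
    apply ssort_split
    · rw [List.pairwise_iff_getElem]
      intro i j hi hj hij
      rw [hlen] at hi hj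
      have h1 : i < a.length := by omega
      have h2 : j < a.length := by omega
      simp only [List.getElem_take]
      rw [← elt_eq h1, ← elt_eq h2]
      exact not_badL_le (hL i (by omega)) hij h2
    · intro x hx y hy
      rcases List.mem_iff_getElem.mp hx with ⟨i, hi, rfl⟩
      rcases List.mem_iff_getElem.mp hy with ⟨j, hj, rfl⟩
      rw [hlen] at hi
      have h1 : i < a.length := by omega
      have h2 : k + j < a.length := by simp only [List.length_drop] at hj; omega
      simp only [List.getElem_take, List.getElem_drop]
      rw [← elt_eq h1, ← elt_eq h2]
      exact not_badL_le (hL i hi) (by omega) h2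
  rcases hb with ⟨j, hj, hkj, hja⟩
  cases hq : ssort (a.drop k) with
  | nil =>
    have : (a.drop k).length = 0 := by
      rw [← ssort_length, hq]; rfl
    simp at this; omega
  | cons m0 t =>
    have hsk : elt (ssort a) k = m0 := by
      rw [hsplit, hq]
      have hlt : k < (List.take k a ++ m0 :: t).length := by simp [hlen]
      rw [elt_eq hlt, List.getElem_append_right (by omega)]
      simp [hlen]
    have hmem : a[j] ∈ a.drop k := by
      have h2 : j - k < (a.drop k).length := by simp; omega
      have : (a.drop k)[j - k] = a[j] := by
        rw [List.getElem_drop]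
        congr 1; omega
      rw [← this]
      exact List.getElem_mem h2
    have hle : m0 ≤ a[j] := PySem.List.key_head_sorted_le (a.drop k) _ hq a[j] hmem
    rw [hsk]
    rw [elt_eq hj, elt_eq hk] at hja
    rw [elt_eq hk]
    omega

theorem agree_suffix {a : List Int} {m : Nat} (hm : m ≤ a.length)
    (hR : ∀ i, m ≤ i → i < a.length → ¬ badR a i) : (ssort a).drop m = a.drop m := by
  have hlen : (a.take m).length = m := by simp [hm]
  have hsplit : ssort a = ssort (a.take m) ++ a.drop m := by
    conv_lhs => rw [← List.take_append_drop m a]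
    apply ssort_split'
    · rw [List.pairwise_iff_getElem]
      intro i j hi hj hij
      simp only [List.length_drop] at hi hj
      have h1 : m + i < a.length := by omega
      have h2 : m + j < a.length := by omega
      simp only [List.getElem_drop]
      rw [← elt_eq h1, ← elt_eq h2]
      exact not_badR_ge (hR (m + j) (by omega) h2) (by omega)
    · intro x hx y hy
      rcases List.mem_iff_getElem.mp hx with ⟨i, hi, rfl⟩
      rcases List.mem_iff_getElem.mp hy with ⟨j, hj, rfl⟩
      rw [hlen] at hi
      simp only [List.length_drop] at hj
      have h1 : i < a.length := by omega
      have h2 : m + j < a.length := by omega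
      simp only [List.getElem_take, List.getElem_drop]
      rw [← elt_eq h1, ← elt_eq h2]
      exact not_badR_ge (hR (m + j) (by omega) h2) (by omega)
  have hslen : (ssort (a.take m)).length = m := by rw [ssort_length, hlen]
  rw [hsplit, List.drop_left' hslen]

theorem mism_at_right {a : List Int} {k : Nat} (hk : k < a.length)
    (hR : ∀ i, k < i → i < a.length → ¬ badR a i) (hb : badR a k) :
    elt a k < elt (ssort a) k := by
  have hm : k + 1 ≤ a.length := hk
  have hlen : (a.take (k + 1)).length = k + 1 := by simp [hm]
  have hsplit : ssort a = ssort (a.take (k + 1)) ++ a.drop (k + 1) := by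
    conv_lhs => rw [← List.take_append_drop (k + 1) a]
    apply ssort_split'
    · rw [List.pairwise_iff_getElem]
      intro i j hi hj hij
      simp only [List.length_drop] at hi hj
      have h1 : k + 1 + i < a.length := by omega
      have h2 : k + 1 + j < a.length := by omega
      simp only [List.getElem_drop]
      rw [← elt_eq h1, ← elt_eq h2]
      exact not_badR_ge (hR (k + 1 + j) (by omega) h2) (by omega)
    · intro x hx y hy
      rcases List.mem_iff_getElem.mp hx with ⟨i, hi, rfl⟩
      rcases List.mem_iff_getElem.mp hy with ⟨j, hj, rfl⟩
      rw [hlen] at hi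
      simp only [List.length_drop] at hj
      have h1 : i < a.length := by omega
      have h2 : k + 1 + j < a.length := by omega
      simp only [List.getElem_take, List.getElem_drop]
      rw [← elt_eq h1, ← elt_eq h2]
      exact not_badR_ge (hR (k + 1 + j) (by omega) h2) (by omega)
  have hslen : (ssort (a.take (k + 1))).length = k + 1 := by rw [ssort_length, hlen]
  rcases hb with ⟨j, hjk, hja⟩
  have hj : j < a.length := by omega
  -- a[j] is somewhere in the sorted prefix, at a position ≤ k, so ≤ the k-th entry
  have hmem : a[j] ∈ ssort (a.take (k + 1)) := by
    rw [ssort, PySem.List.mem_sorted]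
    have h2 : j < (a.take (k + 1)).length := by omega
    have : (a.take (k + 1))[j] = a[j] := List.getElem_take
    rw [← this]
    exact List.getElem_mem h2
  rcases List.mem_iff_getElem.mp hmem with ⟨p, hp, hpv⟩
  rw [hslen] at hp
  have hkl : k < (ssort (a.take (k + 1))).length := by omega
  have hpl : p < (ssort (a.take (k + 1))).length := by omega
  have hmono : (ssort (a.take (k + 1)))[p] ≤ (ssort (a.take (k + 1)))[k] := by
    exact PySem.List.sorted_id_getElem_mono (a.take (k + 1)) (by omega) hkl
  have hsk : elt (ssort a) k = (ssort (a.take (k + 1)))[k] := by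
    rw [hsplit]
    have hlt : k < (ssort (a.take (k + 1)) ++ a.drop (k + 1)).length := by
      simp [hslen]; omega
    rw [elt_eq hlt, List.getElem_append_left (by omega)]
  rw [hsk, elt_eq hk]
  rw [elt_eq hk, elt_eq hj] at hja
  rw [hpv] at hmono
  omega

theorem one_diff {a s : List Int} {k : Nat} (hlen : a.length = s.length)
    (hperm : a.Perm s) (hk : k < a.length)
    (hagree : ∀ i, i < a.length → i ≠ k → elt a i = elt s i) : elt a k = elt s k := by
  have hks : k < s.length := by omega
  have hta : a.take k ++ a[k] :: a.drop (k + 1) = a := by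
    rw [← List.drop_eq_getElem_cons hk, List.take_append_drop]
  have hts : s.take k ++ s[k] :: s.drop (k + 1) = s := by
    rw [← List.drop_eq_getElem_cons hks, List.take_append_drop]
  have htake : a.take k = s.take k := by
    apply List.ext_getElem (by simp; omega)
    intro i h1 h2
    simp only [List.getElem_take]
    have ha1 : i < a.length := by simp at h1; omega
    have hs1 : i < s.length := by omega
    rw [← elt_eq ha1, ← elt_eq hs1]
    exact hagree i ha1 (by simp at h1; omega)
  have hdrop : a.drop (k + 1) = s.drop (k + 1) := by
    apply List.ext_getElem (by simp; omega)
    intro i h1 h2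
    simp only [List.getElem_drop]
    have ha1 : k + 1 + i < a.length := by simp at h1; omega
    have hs1 : k + 1 + i < s.length := by omega
    rw [← elt_eq ha1, ← elt_eq hs1]
    exact hagree _ ha1 (by omega)
  rw [← htake, ← hdrop] at hts
  have hp2 : (a.take k ++ a[k] :: a.drop (k + 1)).Perm (a.take k ++ s[k] :: a.drop (k + 1)) := by
    rw [hta, hts]; exact hperm
  have hp3 : (a[k] :: a.drop (k + 1)).Perm (s[k] :: a.drop (k + 1)) :=
    (List.perm_append_left_iff _).mp hp2
  have hcount := hp3.count_eq a[k]
  simp only [List.count_cons] at hcount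
  rw [elt_eq hk, elt_eq hks]
  by_contra hne
  simp [beq_iff_eq, Ne.symm hne] at hcount

def runMax (a : List Int) : Nat → Int
  | 0 => elt a 0
  | m + 1 => max (runMax a m) (elt a (m + 1))

def rightUp (a : List Int) : Nat → Int
  | 0 => -1
  | m + 1 => if elt a (m + 1) < runMax a m then ((m + 1 : Nat) : Int) else rightUp a m

def minFrom (a : List Int) (c : Nat) : Int :=
  if h : c + 1 < a.length then min (elt a c) (minFrom a (c + 1)) else elt a c
termination_by a.length - c

def leftDown (a : List Int) (c : Nat) : Int :=
  if h : c + 1 < a.length then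
    (if minFrom a (c + 1) < elt a c then (c : Int) else leftDown a (c + 1))
  else -1
termination_by a.length - c

theorem runMax_ge {a : List Int} : ∀ m, ∀ j ≤ m, elt a j ≤ runMax a m := by
  intro m
  induction m with
  | zero => intro j hj; interval_cases j; simp [runMax]
  | succ m ih =>
    intro j hj
    rcases Nat.lt_or_ge j (m + 1) with h | h
    · exact le_trans (ih j (by omega)) (by simp [runMax])
    · have : j = m + 1 := by omega
      subst this; simp [runMax]

theorem runMax_mem {a : List Int} : ∀ m, ∃ j ≤ m, runMax a m = elt a j := by
  intro m
  induction m with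
  | zero => exact ⟨0, le_refl _, rfl⟩
  | succ m ih =>
    rcases ih with ⟨j, hj, hv⟩
    by_cases h : elt a (m + 1) ≤ runMax a m
    · exact ⟨j, by omega, by rw [runMax, max_eq_left h, hv]⟩
    · exact ⟨m + 1, le_refl _, by simp [runMax]; omega⟩

theorem rightUp_cond_iff {a : List Int} (m : Nat) :
    (elt a (m + 1) < runMax a m) ↔ badR a (m + 1) := by
  constructor
  · intro h
    rcases runMax_mem (a := a) m with ⟨j, hj, hv⟩
    exact ⟨j, by omega, by omega⟩
  · rintro ⟨j, hj, hja⟩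
    have := runMax_ge (a := a) m j (by omega)
    omega

theorem rightUp_eq_neg_one {a : List Int} : ∀ m, (∀ i, i ≤ m → ¬ badR a i) → rightUp a m = -1 := by
  intro m
  induction m with
  | zero => intro _; rfl
  | succ m ih =>
    intro h
    rw [rightUp, if_neg]
    · exact ih (fun i hi => h i (by omega))
    · rw [rightUp_cond_iff]
      exact h (m + 1) (le_refl _)

theorem rightUp_eq_last_bad {a : List Int} {k : Nat} (hb : badR a k) :
    ∀ m, k ≤ m → (∀ i, k < i → i ≤ m → ¬ badR a i) → rightUp a m = (k : Int) := by
  intro m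
  induction m with
  | zero =>
    intro hk _
    have : k = 0 := by omega
    subst this
    rcases hb with ⟨j, hj, _⟩; omega
  | succ m ih =>
    intro hk h
    by_cases hkm : k = m + 1
    · subst hkm
      rw [rightUp, if_pos ((rightUp_cond_iff m).mpr hb)]
    · have hk' : k ≤ m := by omega
      rw [rightUp, if_neg]
      · exact ih hk' (fun i h1 h2 => h i h1 (by omega))
      · rw [rightUp_cond_iff]
        exact h (m + 1) (by omega) (le_refl _)

theorem minFrom_le {a : List Int} : ∀ c j, c ≤ j → j < a.length → minFrom a c ≤ elt a j := by
  have H : ∀ d c, a.length - c ≤ d → ∀ j, c ≤ j → j < a.length → minFrom a c ≤ elt a j := by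
    intro d
    induction d with
    | zero => intro c hc j h1 h2; omega
    | succ d ih =>
      intro c hc j h1 h2
      rw [minFrom]
      split
      · rename_i h
        rcases Nat.eq_or_lt_of_le h1 with rfl | hlt
        · exact min_le_left _ _
        · exact le_trans (min_le_right _ _) (ih (c + 1) (by omega) j (by omega) h2)
      · rename_i h
        have : j = c := by omega
        subst this
        exact le_refl _
  intro c j h1 h2
  exact H (a.length - c) c (le_refl _) j h1 h2

theorem minFrom_mem {a : List Int} : ∀ c, c < a.length → ∃ j, c ≤ j ∧ j < a.length ∧ minFrom a c = elt a j := by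
  have H : ∀ d c, a.length - c ≤ d → c < a.length → ∃ j, c ≤ j ∧ j < a.length ∧ minFrom a c = elt a j := by
    intro d
    induction d with
    | zero => intro c hc h; omega
    | succ d ih =>
      intro c hc h
      rw [minFrom]
      split
      · rename_i hin
        rcases ih (c + 1) (by omega) (by omega) with ⟨j, hj1, hj2, hj3⟩
        by_cases hm : elt a c ≤ minFrom a (c + 1)
        · exact ⟨c, le_refl _, h, by rw [min_eq_left hm]⟩
        · exact ⟨j, by omega, hj2, by rw [min_eq_right (by omega), hj3]⟩
      · exact ⟨c, le_refl _, h, rfl⟩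
  intro c h
  exact H (a.length - c) c (le_refl _) h

theorem leftDown_cond_iff {a : List Int} {c : Nat} (h : c + 1 < a.length) :
    (minFrom a (c + 1) < elt a c) ↔ badL a c := by
  constructor
  · intro hlt
    rcases minFrom_mem (a := a) (c + 1) h with ⟨j, hj1, hj2, hj3⟩
    exact ⟨j, hj2, by omega, by omega⟩
  · rintro ⟨j, hj1, hj2, hj3⟩
    have := minFrom_le (a := a) (c + 1) j (by omega) hj1
    omega

theorem leftDown_eq_neg_one {a : List Int} : ∀ c, (∀ i, c ≤ i → ¬ badL a i) → leftDown a c = -1 := by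
  have H : ∀ d c, a.length - c ≤ d → (∀ i, c ≤ i → ¬ badL a i) → leftDown a c = -1 := by
    intro d
    induction d with
    | zero =>
      intro c hc h
      rw [leftDown, dif_neg (by omega)]
    | succ d ih =>
      intro c hc h
      rw [leftDown]
      split
      · rename_i hin
        rw [if_neg, ih (c + 1) (by omega) (fun i hi => h i (by omega))]
        rw [leftDown_cond_iff hin]
        exact h c (le_refl _)
      · rfl
  intro c h
  exact H (a.length - c) c (le_refl _) h

theorem leftDown_eq_first_bad {a : List Int} {k : Nat} (hb : badL a k) :
    ∀ c, c ≤ k → (∀ i, c ≤ i → i < k → ¬ badL a i) → leftDown a c = (k : Int) := by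
  have hkn : k + 1 < a.length := by
    rcases hb with ⟨j, hj1, hj2, _⟩; omega
  have H : ∀ d c, a.length - c ≤ d → c ≤ k → (∀ i, c ≤ i → i < k → ¬ badL a i) →
      leftDown a c = (k : Int) := by
    intro d
    induction d with
    | zero => intro c hc h1 h2; omega
    | succ d ih =>
      intro c hc h1 h2
      rcases Nat.eq_or_lt_of_le h1 with rfl | hlt
      · rw [leftDown, dif_pos hkn, if_pos ((leftDown_cond_iff hkn).mpr hb)]
      · have hin : c + 1 < a.length := by omega
        rw [leftDown, dif_pos hin, if_neg, ih (c + 1) (by omega) (by omega)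
          (fun i hi1 hi2 => h2 i (by omega) hi2)]
        rw [leftDown_cond_iff hin]
        exact h2 c (le_refl _) hlt
  intro c h1 h2
  exact H (a.length - c) c (le_refl _) h1 h2

theorem pyGetD_nat {a : List Int} (k : Nat) : PySem.List.pyGetD a (k : Int) 0 = elt a k := by
  rw [PySem.List.pyGetD_natCast]; rfl

theorem b_right_fold {a : List Int} : ∀ m : Nat,
    (PySem.List.pyRange 1 ((m : Int) + 1) 1).foldl
        (fun (s : Int × Int) i =>
          let x := PySem.List.pyGetD a i 0
          if x < s.2 then (i, s.2) else (s.1, x))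
        (-1, PySem.List.pyGetD a 0 0)
      = (rightUp a m, runMax a m) := by
  intro m
  induction m with
  | zero =>
    rw [PySem.List.pyRange_one_eq_nil (by norm_num)]
    simp only [List.foldl_nil]
    rw [rightUp, runMax]
    exact congrArg (fun z => ((-1 : Int), z)) (pyGetD_nat 0)
  | succ m ih =>
    have hcast : ((m + 1 : Nat) : Int) + 1 = ((m : Int) + 1) + 1 := by push_cast; ring
    rw [hcast, PySem.List.pyRange_one_succ_right (by omega), List.foldl_append, ih]
    simp only [List.foldl_cons, List.foldl_nil]
    have hget : PySem.List.pyGetD a ((m : Int) + 1) 0 = elt a (m + 1) := by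
      rw [show ((m : Int) + 1) = ((m + 1 : Nat) : Int) from by push_cast; ring, pyGetD_nat]
    rw [hget]
    by_cases h : elt a (m + 1) < runMax a m
    · rw [if_pos h]
      rw [show rightUp a (m + 1) = ((m + 1 : Nat) : Int) from by rw [rightUp, if_pos h]]
      rw [show runMax a (m + 1) = runMax a m from by rw [runMax, max_eq_left (by omega)]]
      exact congrArg (fun z => (z, runMax a m)) (by push_cast; ring)
    · rw [if_neg h]
      rw [show rightUp a (m + 1) = rightUp a m from by rw [rightUp, if_neg h]]
      rw [show runMax a (m + 1) = elt a (m + 1) from by rw [runMax, max_eq_right (by omega)]]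

theorem b_left_fold {a : List Int} : ∀ c : Nat, c < a.length →
    (PySem.List.pyRange ((c : Int) - 1) (-1) (-1)).foldl
        (fun (s : Int × Int) i =>
          let x := PySem.List.pyGetD a i 0
          if s.2 < x then (i, s.2) else (s.1, x))
        (leftDown a c, minFrom a c)
      = (leftDown a 0, minFrom a 0) := by
  intro c
  induction c with
  | zero =>
    intro _
    rw [show ((0 : Nat) : Int) - 1 = -1 from by norm_num]
    rw [PySem.List.pyRange_neg_one_eq_nil (by norm_num)]
    rfl
  | succ c ih =>
    intro hc
    have hc' : c + 1 < a.length := hc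
    have hcast : ((c + 1 : Nat) : Int) - 1 = (c : Int) := by push_cast; ring
    rw [hcast, PySem.List.pyRange_neg_one_cons (by omega)]
    simp only [List.foldl_cons, pyGetD_nat]
    have hstep2 :
        (if minFrom a (c + 1) < elt a c then ((c : Int), minFrom a (c + 1))
          else (leftDown a (c + 1), elt a c)) = (leftDown a c, minFrom a c) := by
      rw [show leftDown a c = if minFrom a (c + 1) < elt a c then (c : Int) else leftDown a (c + 1)
        from by rw [leftDown, dif_pos hc']]
      rw [show minFrom a c = min (elt a c) (minFrom a (c + 1)) from by rw [minFrom, dif_pos hc']]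
      by_cases h : minFrom a (c + 1) < elt a c
      · rw [if_pos h, if_pos h, min_eq_right (by omega)]
      · rw [if_neg h, if_neg h, min_eq_left (by omega)]
    rw [hstep2]
    exact ih (by omega)

theorem foldl_if_filter' {α β : Type} (p : α → Prop) [DecidablePred p] (g : β → α → β) :
    ∀ (l : List α) (init : β),
      l.foldl (fun r i => if p i then g r i else r) init
        = (l.filter (fun i => decide (p i))).foldl g init := by
  intro l
  induction l with
  | nil => intro init; rfl
  | cons x t ih =>
    intro init
    by_cases h : p x <;> simp [h, ih]

theorem foldl_pair_snd_nat : ∀ (t : List Nat) (c d : Int), c ≠ -1 →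
    t.foldl (fun (r : Int × Int) (k : Nat) =>
        if r.1 = -1 then ((k : Int), r.2) else (r.1, (k : Int))) (c, d)
      = (c, (t.map (fun x => (x : Int))).getLastD d) := by
  intro t
  induction t with
  | nil => intro c d h; rfl
  | cons x t ih =>
    intro c d h
    simp only [List.foldl_cons, if_neg h]
    rw [ih c (x : Int) h]
    cases t with
    | nil => simp
    | cons y u => simp [List.getLast?_cons]

theorem subarray_sort_eq (a : List Int) :
    subarray_sort a
      = match mis a with
        | [] => [-1, -1]
        | k :: t => [(k : Int), (t.map (fun x => (x : Int))).getLastD (-1)] := by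
  rw [subarray_sort]
  simp only [PySem.List.len_eq, PySem.List.pyRange_one, sub_zero, Int.toNat_natCast,
    List.foldl_map, zero_add, pyGetD_nat,
    show PySem.List.sorted a (fun x => x) false = ssort a from rfl]
  rw [foldl_if_filter' (fun k => elt a k ≠ elt (ssort a) k)
    (fun (r : Int × Int) (k : Nat) => if r.1 = -1 then ((k : Int), r.2) else (r.1, (k : Int)))]
  rw [show ((List.range a.length).filter fun i => decide (elt a i ≠ elt (ssort a) i)) = mis a
    from rfl]
  cases hm : mis a with
  | nil => rfl
  | cons k t =>
    simp only [List.foldl_cons]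
    simp only [if_true]
    rw [foldl_pair_snd_nat t ((k : Nat) : Int) (-1) (by omega)]

theorem subarray_sort_alt_eq {a : List Int} (hn : a ≠ []) :
    subarray_sort_alt a = [leftDown a 0, rightUp a (a.length - 1)] := by
  have hl : 1 ≤ a.length := List.length_pos_iff.mpr hn
  have h1 : (PySem.List.pyRange 1 ((a.length : Int)) 1).foldl
        (fun (s : Int × Int) i =>
          let x := PySem.List.pyGetD a i 0
          if x < s.2 then (i, s.2) else (s.1, x))
        (-1, PySem.List.pyGetD a 0 0)
      = (rightUp a (a.length - 1), runMax a (a.length - 1)) := by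
    rw [show ((a.length : Int)) = ((a.length - 1 : Nat) : Int) + 1 from by omega]
    exact b_right_fold (a.length - 1)
  have h2 : (PySem.List.pyRange ((a.length : Int) - 2) (-1) (-1)).foldl
        (fun (s : Int × Int) i =>
          let x := PySem.List.pyGetD a i 0
          if s.2 < x then (i, s.2) else (s.1, x))
        (-1, PySem.List.pyGetD a ((a.length : Int) - 1) 0)
      = (leftDown a 0, minFrom a 0) := by
    rw [show ((a.length : Int) - 1) = ((a.length - 1 : Nat) : Int) from by omega, pyGetD_nat]
    rw [show ((a.length : Int) - 2) = ((a.length - 1 : Nat) : Int) - 1 from by omega]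
    rw [show ((-1 : Int), elt a (a.length - 1)) = (leftDown a (a.length - 1), minFrom a (a.length - 1)) from by
      rw [show leftDown a (a.length - 1) = -1 from by rw [leftDown, dif_neg (by omega)],
        show minFrom a (a.length - 1) = elt a (a.length - 1) from by rw [minFrom, dif_neg (by omega)]]]
    exact b_left_fold (a.length - 1) (by omega)
  rw [subarray_sort_alt]
  simp only [PySem.List.len_eq]
  rw [if_pos (show (a.length : Int) ≠ 0 from by omega)]
  rw [h1, h2]

theorem getLastD_map_cast : ∀ (t : List Nat) (h : t ≠ []) (d : Int),
    (t.map (fun x => (x : Int))).getLastD d = ((t.getLast h : Nat) : Int) := by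
  intro t
  induction t with
  | nil => intro h; simp at h
  | cons x t ih =>
    intro h d
    cases t with
    | nil => simp
    | cons y u =>
      simp only [List.getLast_cons (List.cons_ne_nil y u)]
      exact ih (List.cons_ne_nil y u) (x : Int)

theorem main_equiv (a : List Int) : subarray_sort a = subarray_sort_alt a := by
  by_cases hn : a = []
  · subst hn; rfl
  · rw [subarray_sort_eq, subarray_sort_alt_eq hn]
    have hl : 1 ≤ a.length := List.length_pos_iff.mpr hn
    have hlen_s : (ssort a).length = a.length := ssort_length a
    cases hm : mis a with
    | nil =>
      have has : a = ssort a := mis_eq_nil_iff.mp hm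
      have hpw : a.Pairwise (· ≤ ·) := by
        rw [has]; exact PySem.List.sorted_pairwise a (fun x => x)
      have hnl : ∀ i, ¬ badL a i := by
        rintro i ⟨j, hj, hij, hja⟩
        have hi : i < a.length := by omega
        have := List.pairwise_iff_getElem.mp hpw i j hi hj hij
        rw [← elt_eq hi, ← elt_eq hj] at this
        omega
      have hnr : ∀ i, i < a.length → ¬ badR a i := by
        rintro i hi ⟨j, hj, hja⟩
        have hjn : j < a.length := by omega
        have := List.pairwise_iff_getElem.mp hpw j i hjn hi hj
        rw [← elt_eq hjn, ← elt_eq hi] at this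
        omega
      rw [leftDown_eq_neg_one 0 (fun i _ => hnl i),
        rightUp_eq_neg_one (a.length - 1) (fun i hi => hnr i (by omega))]
    | cons k t =>
      have hne : mis a ≠ [] := by rw [hm]; simp
      have hkmem : k ∈ mis a := by rw [hm]; simp
      obtain ⟨hkn, hkmis⟩ := mem_mis.mp hkmem
      have hleast : ∀ x ∈ mis a, k ≤ x := by
        intro x hx
        rw [hm] at hx
        rcases List.mem_cons.mp hx with rfl | hx'
        · exact le_refl _
        · have hp := mis_pairwise a
          rw [hm] at hp
          exact le_of_lt ((List.pairwise_cons.mp hp).1 x hx')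
      set G := (k :: t).getLast (List.cons_ne_nil k t) with hGdef
      have hGmem : G ∈ mis a := by
        rw [hm]; exact List.getLast_mem _
      obtain ⟨hGn, hGmis⟩ := mem_mis.mp hGmem
      have hGmax : ∀ x ∈ mis a, x ≤ G := by
        intro x hx
        rw [hm] at hx
        exact pairwise_lt_le_getLast (hm ▸ mis_pairwise a) (List.cons_ne_nil k t) hx
      -- the single-mismatch case is impossible (a permutation can't differ at one spot)
      have htne : t ≠ [] := by
        intro h0
        rw [h0] at hm
        apply hkmis
        apply one_diff hlen_s.symm (ssort_perm a).symm hkn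
        intro i hi hik
        by_contra hdi
        have : i ∈ mis a := mem_mis.mpr ⟨hi, hdi⟩
        rw [hm] at this; simp at this; omega
      -- left boundary: k is the first badL index
      have hclean : ∀ i, i < k → ¬ badL a i := by
        intro i
        induction i using Nat.strong_induction_on with
        | _ i ih =>
          intro hik hbad
          have hi : i < a.length := by
            rcases hbad with ⟨j, hj, hij, _⟩; omega
          have := mism_at_left hi (fun i' hi' => ih i' hi' (by omega)) hbad
          have hmem : i ∈ mis a := mem_mis.mpr ⟨hi, by omega⟩
          have := hleast i hmem
          omega
      have hbadk : badL a k := by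
        by_contra hnb
        have hL : ∀ i, i < k + 1 → ¬ badL a i := by
          intro i hi
          rcases Nat.lt_or_ge i k with h | h
          · exact hclean i h
          · have : i = k := by omega
            subst this; exact hnb
        have htake := agree_prefix (by omega) hL
        have e := congrArg (fun (l : List Int) => l[k]?) htake
        simp only [List.getElem?_take] at e
        apply hkmis
        rw [elt_eq hkn, elt_eq (show k < (ssort a).length from by omega)]
        have e1 : (ssort a)[k]? = a[k]? := by simpa [show k < k + 1 from by omega] using e
        rw [List.getElem?_eq_getElem hkn, List.getElem?_eq_getElem (by omega)] at e1
        simpa using e1.symm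
      -- right boundary: G is the last badR index
      have hcleanR : ∀ d i, a.length - i ≤ d → G < i → i < a.length → ¬ badR a i := by
        intro d
        induction d with
        | zero => intro i h hGi hi; omega
        | succ d ih =>
          intro i h hGi hi hbad
          have hR' : ∀ i', i < i' → i' < a.length → ¬ badR a i' := fun i' h1 h2 =>
            ih i' (by omega) (by omega) h2
          have := mism_at_right hi hR' hbad
          have hmem : i ∈ mis a := mem_mis.mpr ⟨hi, by omega⟩
          have := hGmax i hmem
          omega
      have hbadG : badR a G := by
        by_contra hnb
        have hR : ∀ i, G ≤ i → i < a.length → ¬ badR a i := by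
          intro i hGi hi
          rcases Nat.eq_or_lt_of_le hGi with rfl | h
          · exact hnb
          · exact hcleanR (a.length - i) i (le_refl _) h hi
        have hdrop := agree_suffix (by omega) hR
        have e := congrArg (fun (l : List Int) => l[0]?) hdrop
        simp only [List.getElem?_drop, Nat.add_zero] at e
        apply hGmis
        rw [elt_eq hGn, elt_eq (show G < (ssort a).length from by omega)]
        rw [List.getElem?_eq_getElem (show G < (ssort a).length from by omega),
          List.getElem?_eq_getElem hGn] at e
        simpa using e.symm
      rw [leftDown_eq_first_bad hbadk 0 (by omega) (fun i _ hi => hclean i hi),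
        rightUp_eq_last_bad hbadG (a.length - 1) (by omega)
          (fun i h1 h2 => hcleanR (a.length - i) i (le_refl _) h1 (by omega))]
      -- the recorded last mismatch is G
      have hGt : G = t.getLast htne := List.getLast_cons htne
      show [(k : Int), (t.map (fun x => (x : Int))).getLastD (-1)] = [(k : Int), (G : Int)]
      rw [getLastD_map_cast t htne, hGt]

-- ===== VERDICT (by name: the statement is the Claim_ definition above) =====
theorem subarray_sort_spec : Claim_equal_subarray_sort := by
  intro a _
  unfold Spec_subarray_sort
  exact main_equiv a
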